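-- pv_equiv track=rewrite | github.com/aakashunnikrishnan/Python_dump | arrays/first_repeating_dict_index.py | first_repeating_dict_index
-- ===== SOURCE A (Python) =====
-- def first_repeating_dict_index(arr):
--     """Find first repeating element using dictionary to track indices"""
--     index_map = {}
--     first_repeat_index = float('inf')
--     first_repeat_value = None
--
--     for i, num in enumerate(arr):
--         if num in index_map:
--             # Found a repeat, check if this is earlier than previous repeat
--             if index_map[num] < first_repeat_index:
--                 first_repeat_index = index_map[num]
--                 first_repeat_value = num
--         else:
--             index_map[num] = i
--
--     return first_repeat_value
-- ===== SOURCE B (Python) =====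
-- def first_repeating_dict_index(arr):
--     """Find first repeating element using dictionary to track indices"""
--     counts = {}
--     for num in arr:
--         counts[num] = counts.get(num, 0) + 1
--     for num in arr:
--         if counts[num] > 1:
--             return num
--     return None
-- ===== Notes on version B (the rewrite author's own statement) =====
-- stated objective: simpler
-- what changed: Replaces A's single-pass first-index map with running minimum-index/value tracking by a two-pass count-then-scan: build a count table, then return the first element in positional order whose count exceeds 1 (the earliest first occurrence among repeating values is exactly the first positioned repeater).
import Mathlib
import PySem

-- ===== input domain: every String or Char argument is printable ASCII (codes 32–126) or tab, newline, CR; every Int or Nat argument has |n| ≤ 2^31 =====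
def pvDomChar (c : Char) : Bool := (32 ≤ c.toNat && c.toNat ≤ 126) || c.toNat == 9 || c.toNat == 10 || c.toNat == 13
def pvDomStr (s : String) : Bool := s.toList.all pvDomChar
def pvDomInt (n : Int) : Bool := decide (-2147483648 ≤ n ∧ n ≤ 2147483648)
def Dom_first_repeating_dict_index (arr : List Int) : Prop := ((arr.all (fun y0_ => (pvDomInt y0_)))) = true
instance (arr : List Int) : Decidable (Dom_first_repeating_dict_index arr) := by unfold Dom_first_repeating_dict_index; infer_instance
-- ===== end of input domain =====

-- B replaces A's single-pass index-map-with-running-minimum by a count-table pass followed by a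
-- positional scan for the first element with count > 1 (objective: simpler).

-- ===== PORT A =====
-- float('inf') is modelled as `none` in the Option Int index slot (j < inf is always true);
-- this is exact here because every stored index is a finite integer.
def pvAStep (st : PySem.Dict Int Int × Option Int × Option Int) (p : Int × Int) :
    PySem.Dict Int Int × Option Int × Option Int :=
  match st.1.get? p.2 with
  | some j =>
      if (match st.2.1 with | none => true | some b => decide (j < b)) then
        (st.1, some j, some p.2)
      else st
  | none => (st.1.insert p.2 p.1, st.2.1, st.2.2)

def first_repeating_dict_index (arr : List Int) : Option Int :=
  ((PySem.List.enumerate arr).foldl pvAStep (PySem.Dict.empty, none, none)).2.2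

-- ===== PORT B =====
-- counts[num] in Source B's second loop is ported as getD _ 0: exact, since num ∈ arr is always a key.
def pvBScan (counts : PySem.Dict Int Int) : List Int → Option Int
  | [] => none
  | num :: rest => if 1 < counts.getD num 0 then some num else pvBScan counts rest

def first_repeating_dict_index_alt (arr : List Int) : Option Int :=
  let counts := arr.foldl (fun (c : PySem.Dict Int Int) num => c.insert num (c.getD num 0 + 1))
    PySem.Dict.empty
  pvBScan counts arr

-- ===== PRECONDITION & SPEC =====
def Spec_first_repeating_dict_index (arr : List Int) (out : Option Int) : Prop := out = first_repeating_dict_index_alt arr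
instance (arr : List Int) (out : Option Int) : Decidable (Spec_first_repeating_dict_index arr out) := by unfold Spec_first_repeating_dict_index; infer_instance

-- ===== CLAIM (what is proved, stated in full; the proofs are below) =====
def Claim_equal_first_repeating_dict_index : Prop := ∀ (arr : List Int), Dom_first_repeating_dict_index arr → Spec_first_repeating_dict_index arr (first_repeating_dict_index arr)

-- ===== LEMMAS AND PROOFS =====

-- the common characterisation: the first positioned element that occurs more than once
def pvFirstRep (l : List Int) : Option Int := l.find? (fun x => decide (1 < l.count x))

-- B = pvFirstRep
theorem pvBScan_eq_find? (counts : PySem.Dict Int Int) (arr l : List Int)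
    (h : ∀ v : Int, counts.getD v 0 = (arr.count v : Int)) :
    pvBScan counts l = l.find? (fun x => decide (1 < arr.count x)) := by
  induction l with
  | nil => rfl
  | cons num rest ih =>
      simp only [pvBScan, List.find?_cons, h num]
      by_cases hc : 1 < arr.count num
      · have : ((1 : Int) < (arr.count num : Int)) := by exact_mod_cast hc
        simp [this, hc]
      · have : ¬ ((1 : Int) < (arr.count num : Int)) := by exact_mod_cast hc
        simp [this, hc, ih]

theorem alt_eq_firstRep (arr : List Int) :
    first_repeating_dict_index_alt arr = pvFirstRep arr := by
  unfold first_repeating_dict_index_alt pvFirstRep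
  exact pvBScan_eq_find? _ arr arr (fun v => by
    simpa using PySem.Dict.getD_foldl_insert_add_one arr PySem.Dict.empty v)

-- find? with a disjoined equality test picks the earlier of the two first occurrences
theorem find?_or_eq (q : Int → Bool) (x : Int) :
    ∀ (p : List Int), x ∈ p →
    p.find? (fun y => q y || y == x) =
      (match p.find? q with
       | none => some x
       | some b => if p.idxOf x < p.idxOf b then some x else some b) := by
  intro p
  induction p with
  | nil => intro h; cases h
  | cons y t ih =>
      intro hx
      by_cases hyx : y = x
      · subst hyx
        simp only [List.find?_cons, BEq.rfl, Bool.or_true]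
        by_cases hq : q y = true
        · simp [hq, List.idxOf_cons_self]
        · simp only [hq]
          cases hft : t.find? q with
          | none => simp
          | some b =>
              have hbq : q b = true := List.find?_some hft
              have hby : b ≠ y := fun h => hq (h ▸ hbq)
              simp [List.idxOf_cons_self, List.idxOf_cons_ne _ (Ne.symm hby)]
      · have hxt : x ∈ t := by
          rcases List.mem_cons.mp hx with h | h
          · exact absurd h.symm hyx
          · exact h
        by_cases hq : q y = true
        · simp [hq, List.idxOf_cons_self]
        · have hyx' : (y == x) = false := by simp [hyx]
          simp only [List.find?_cons, hq, hyx', Bool.or_false]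
          rw [ih hxt]
          cases hft : t.find? q with
          | none => simp
          | some b =>
              have hbq : q b = true := List.find?_some hft
              have hby : b ≠ y := fun h => hq (h ▸ hbq)
              show (if t.idxOf x < t.idxOf b then some x else some b)
                = if (y::t).idxOf x < (y::t).idxOf b then some x else some b
              rw [List.idxOf_cons_ne t hyx, List.idxOf_cons_ne t (Ne.symm hby)]
              by_cases hlt : t.idxOf x < t.idxOf b
              · rw [if_pos hlt, if_pos (Nat.succ_lt_succ hlt)]
              · rw [if_neg hlt, if_neg (fun h => hlt (Nat.lt_of_succ_lt_succ h))]

-- predicate congruence for find?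
theorem find?_congr_mem {α : Type} (l : List α) (p q : α → Bool)
    (h : ∀ x ∈ l, p x = q x) : l.find? p = l.find? q := by
  induction l with
  | nil => rfl
  | cons y t ih =>
      simp only [List.find?_cons, h y (List.mem_cons_self)]
      cases hq : q y with
      | true => rfl
      | false => exact ih (fun x hx => h x (List.mem_cons_of_mem _ hx))

-- how pvFirstRep evolves under appending one element
theorem count_append_singleton_ne (p : List Int) (x y : Int) (h : y ≠ x) :
    (p ++ [x]).count y = p.count y := by
  simp [List.count_append, Ne.symm h]

theorem firstRep_append_not_mem (p : List Int) (x : Int) (hx : x ∉ p) :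
    pvFirstRep (p ++ [x]) = pvFirstRep p := by
  unfold pvFirstRep
  rw [List.find?_append]
  have hxcnt : p.count x = 0 := List.count_eq_zero.mpr hx
  have hlast : List.find? (fun y => decide (1 < (p ++ [x]).count y)) [x] = none := by
    simp [List.count_append, hxcnt]
  rw [hlast, Option.or_none]
  exact find?_congr_mem p _ _ (fun y hy => by
    have hyx : y ≠ x := fun h => hx (h ▸ hy)
    rw [count_append_singleton_ne p x y hyx])

theorem firstRep_append_mem (p : List Int) (x : Int) (hx : x ∈ p) :
    pvFirstRep (p ++ [x]) =
      (match pvFirstRep p with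
       | none => some x
       | some b => if p.idxOf x < p.idxOf b then some x else some b) := by
  unfold pvFirstRep
  have hcong : (p ++ [x]).find? (fun y => decide (1 < (p ++ [x]).count y)) =
      (p ++ [x]).find? (fun y => decide (1 < p.count y) || y == x) := by
    refine find?_congr_mem _ _ _ (fun y _ => ?_)
    by_cases hyx : y = x
    · subst hyx
      have h1 : 1 ≤ p.count y := List.one_le_count_iff.mpr hx
      have h2 : (p ++ [y]).count y = p.count y + 1 := by simp [List.count_append]
      simp [h2]
      omega
    · rw [count_append_singleton_ne p x y hyx]
      simp [hyx]
  rw [hcong, List.find?_append]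
  have hor : p.find? (fun y => decide (1 < p.count y) || y == x) =
      (match p.find? (fun y => decide (1 < p.count y)) with
       | none => some x
       | some b => if p.idxOf x < p.idxOf b then some x else some b) :=
    find?_or_eq _ x p hx
  rw [hor]
  cases hfp : p.find? (fun y => decide (1 < p.count y)) with
  | none => simp
  | some b => by_cases hlt : p.idxOf x < p.idxOf b <;> simp [hlt]

-- the loop invariant for A's fold
def pvInv (p : List Int) (st : PySem.Dict Int Int × Option Int × Option Int) : Prop :=
  (∀ v : Int, st.1.get? v = if v ∈ p then some ((p.idxOf v : Nat) : Int) else none) ∧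
  st.2.1 = (pvFirstRep p).map (fun v => ((p.idxOf v : Nat) : Int)) ∧
  st.2.2 = pvFirstRep p

theorem pvInv_fold (p : List Int) :
    pvInv p ((PySem.List.enumerate p).foldl pvAStep (PySem.Dict.empty, none, none)) := by
  induction p using List.reverseRecOn with
  | nil =>
      refine ⟨fun v => by simp [PySem.List.enumerate_nil, PySem.Dict.get?_empty], rfl, rfl⟩
  | append_singleton p x ih =>
      obtain ⟨hm, hfri, hfrv⟩ := ih
      have hfold : (PySem.List.enumerate (p ++ [x])).foldl pvAStep (PySem.Dict.empty, none, none)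
          = pvAStep ((PySem.List.enumerate p).foldl pvAStep (PySem.Dict.empty, none, none))
              ((0 : Int) + p.length, x) := by
        rw [PySem.List.enumerate_append, List.foldl_append]
        simp [PySem.List.enumerate_cons, PySem.List.enumerate_nil]
      rw [hfold]
      set st := (PySem.List.enumerate p).foldl pvAStep (PySem.Dict.empty, none, none) with hst
      by_cases hx : x ∈ p
      · -- repeat branch
        have hget : st.1.get? x = some ((p.idxOf x : Nat) : Int) := by rw [hm x, if_pos hx]
        have hidx : ∀ v ∈ p, (p ++ [x]).idxOf v = p.idxOf v := fun v hv => by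
          rw [List.idxOf_append, if_pos hv]
        have hmem : ∀ v : Int, (v ∈ p ++ [x]) ↔ v ∈ p := fun v => by
          simp only [List.mem_append, List.mem_singleton]
          exact ⟨fun h => h.elim id (fun h => h ▸ hx), Or.inl⟩
        have hm' : ∀ v : Int, st.1.get? v =
            if v ∈ p ++ [x] then some (((p ++ [x]).idxOf v : Nat) : Int) else none := by
          intro v
          rw [hm v]
          by_cases hv : v ∈ p
          · rw [if_pos hv, if_pos ((hmem v).mpr hv), hidx v hv]
          · rw [if_neg hv, if_neg (fun h => hv ((hmem v).mp h))]
        cases hfp : pvFirstRep p with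
        | none =>
            have hcond : st.2.1 = none := by rw [hfri, hfp]; rfl
            have : pvAStep st ((0 : Int) + p.length, x)
                = (st.1, some ((p.idxOf x : Nat) : Int), some x) := by
              unfold pvAStep
              rw [hget, hcond]
              simp
            rw [this]
            refine ⟨hm', ?_, ?_⟩
            · rw [firstRep_append_mem p x hx, hfp]
              simp [hidx x hx]
            · rw [firstRep_append_mem p x hx, hfp]
        | some b =>
            have hbmem : b ∈ p := List.mem_of_find?_eq_some hfp
            have hcond : st.2.1 = some ((p.idxOf b : Nat) : Int) := by rw [hfri, hfp]; rfl
            by_cases hlt : p.idxOf x < p.idxOf b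
            · have hltZ : ((p.idxOf x : Nat) : Int) < ((p.idxOf b : Nat) : Int) := by
                exact_mod_cast hlt
              have : pvAStep st ((0 : Int) + p.length, x)
                  = (st.1, some ((p.idxOf x : Nat) : Int), some x) := by
                unfold pvAStep
                rw [hget, hcond]
                simp [hltZ]
              rw [this]
              refine ⟨hm', ?_, ?_⟩
              · rw [firstRep_append_mem p x hx, hfp]
                simp [hlt, hidx x hx]
              · rw [firstRep_append_mem p x hx, hfp]
                simp [hlt]
            · have hltZ : ¬ (((p.idxOf x : Nat) : Int) < ((p.idxOf b : Nat) : Int)) := by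
                exact_mod_cast hlt
              have : pvAStep st ((0 : Int) + p.length, x) = st := by
                unfold pvAStep
                rw [hget, hcond]
                simp [hltZ]
              rw [this]
              refine ⟨hm', ?_, ?_⟩
              · rw [firstRep_append_mem p x hx, hfp, hfri, hfp]
                simp [hlt, hidx b hbmem]
              · rw [firstRep_append_mem p x hx, hfp, hfrv, hfp]
                simp [hlt]
      · -- fresh key branch
        have hget : st.1.get? x = none := by rw [hm x, if_neg hx]
        have : pvAStep st ((0 : Int) + p.length, x)
            = (st.1.insert x ((0 : Int) + p.length), st.2.1, st.2.2) := by
          unfold pvAStep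
          rw [hget]
        rw [this]
        have hidx : ∀ v ∈ p, (p ++ [x]).idxOf v = p.idxOf v := fun v hv => by
          rw [List.idxOf_append, if_pos hv]
        refine ⟨?_, ?_, ?_⟩
        · intro v
          rw [PySem.Dict.get?_insert]
          by_cases hvx : v = x
          · have hv' : v ∈ p ++ [x] := by simp [hvx]
            have hidxv : (p ++ [x]).idxOf v = p.length := by
              rw [hvx, List.idxOf_append, if_neg hx, List.idxOf_cons_self]
              omega
            rw [if_pos hvx, if_pos hv', hidxv]
            simp
          · rw [if_neg hvx, hm v]
            by_cases hv : v ∈ p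
            · have hv' : v ∈ p ++ [x] := by simp [hv]
              rw [if_pos hv, if_pos hv', hidx v hv]
            · have hv' : ¬ v ∈ p ++ [x] := by simp [hv, hvx]
              rw [if_neg hv, if_neg hv']
        · rw [firstRep_append_not_mem p x hx, hfri]
          cases hfp : pvFirstRep p with
          | none => rfl
          | some b =>
              have hbmem : b ∈ p := List.mem_of_find?_eq_some hfp
              simp [hidx b hbmem]
        · rw [firstRep_append_not_mem p x hx, hfrv]

theorem a_eq_firstRep (arr : List Int) :
    first_repeating_dict_index arr = pvFirstRep arr := by
  exact (pvInv_fold arr).2.2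

-- ===== VERDICT (by name: the statement is the Claim_ definition above) =====
theorem first_repeating_dict_index_spec : Claim_equal_first_repeating_dict_index := by
  intro arr _
  unfold Spec_first_repeating_dict_index
  rw [a_eq_firstRep, alt_eq_firstRep]
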